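-- pv_equiv track=rewrite | github.com/pypi-data/pypi-mirror-139 | packages/SongNameSplit/SongNameSplit-0.0.6.tar.gz/SongNameSplit-0.0.6/libFol/__init__.py | junkRmv
-- ===== SOURCE A (Python) =====
-- def junkRmv(inputName):
--     fname = list(inputName)
--     songname = ''
--     hyphc = 0
--     for i in range(len(fname)):
--         if fname[i] == '(' or fname[i] == '{' or fname[i] == '|' or fname[i] == '[':
--             break
--         if fname[i] == '-':
--             hyphc += 1
--         if fname[i] == '-' and hyphc == 2:
--             break
--         songname += str(fname[i])
--
--     return songname
-- ===== SOURCE B (Python) =====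
-- def junkRmv(inputName):
--     n = len(inputName)
--     bracket = next((i for i, c in enumerate(inputName) if c in '({|['), n)
--     hyphens = [i for i, c in enumerate(inputName) if c == '-']
--     second = hyphens[1] if len(hyphens) >= 2 else n
--     return inputName[:min(bracket, second)]
-- ===== Notes on version B (the rewrite author's own statement) =====
-- stated objective: alternative
-- what changed: Replaces A's single accumulate-with-break loop (building the string char by char while counting hyphens) with a boundary computation: find the first bracket index and the second hyphen index independently, then slice the input at the minimum of the two.
import Mathlib
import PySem

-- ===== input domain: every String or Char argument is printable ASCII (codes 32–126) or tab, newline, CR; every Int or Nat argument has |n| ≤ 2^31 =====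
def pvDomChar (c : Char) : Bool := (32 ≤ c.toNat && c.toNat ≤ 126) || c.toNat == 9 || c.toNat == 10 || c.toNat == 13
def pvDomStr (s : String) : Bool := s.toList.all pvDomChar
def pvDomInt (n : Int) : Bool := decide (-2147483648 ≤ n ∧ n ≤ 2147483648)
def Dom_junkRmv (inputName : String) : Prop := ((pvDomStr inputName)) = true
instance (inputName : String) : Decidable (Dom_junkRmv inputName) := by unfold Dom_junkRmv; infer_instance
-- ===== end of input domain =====

-- B replaces A's accumulate-with-break loop by computing the two cut boundaries (first bracket,
-- second hyphen) separately and slicing at their minimum; alternative decomposition, same cost.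

-- ===== PORT A =====
-- A's loop: walk the characters keeping the accumulated name (as a char list) and the hyphen count
def junkRmvLoop : List Char → Int → List Char
  | [], _ => []
  | c :: rest, hyphc =>
    if c = '(' ∨ c = '{' ∨ c = '|' ∨ c = '[' then []
    else
      let hyphc' := if c = '-' then hyphc + 1 else hyphc
      if c = '-' ∧ hyphc' = 2 then []
      else c :: junkRmvLoop rest hyphc'

def junkRmv (inputName : String) : String :=
  String.ofList (junkRmvLoop inputName.toList 0)

-- ===== PORT B =====
def junkRmv_alt (inputName : String) : String :=
  let cs := inputName.toList
  let n : Int := cs.length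
  let bracket : Int :=
    (((PySem.List.enumerate cs 0).find? (fun p => p.2 ∈ ['(', '{', '|', '['])).map (·.1)).getD n
  let hyphens : List Int := ((PySem.List.enumerate cs 0).filter (fun p => p.2 = '-')).map (·.1)
  let second : Int := if 2 ≤ hyphens.length then hyphens[1]! else n
  String.ofList (PySem.List.slice cs none (some (min bracket second)))

-- ===== PRECONDITION & SPEC =====
def Spec_junkRmv (inputName : String) (out : String) : Prop := out = junkRmv_alt inputName
instance (inputName : String) (out : String) : Decidable (Spec_junkRmv inputName out) := by unfold Spec_junkRmv; infer_instance

-- ===== CLAIM (what is proved, stated in full; the proofs are below) =====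
def Claim_equal_junkRmv : Prop := ∀ (inputName : String), Dom_junkRmv inputName → Spec_junkRmv inputName (junkRmv inputName)

-- ===== LEMMAS AND PROOFS =====

-- index of the first bracket character (length if none)
def bracketIdx : List Char → Nat
  | [] => 0
  | c :: r => if c = '(' ∨ c = '{' ∨ c = '|' ∨ c = '[' then 0 else 1 + bracketIdx r

-- index of the k-th hyphen, k ≥ 1 (length if there are fewer than k hyphens)
def hyIdx : Nat → List Char → Nat
  | _, [] => 0
  | k, c :: r => if c = '-' ∧ k = 1 then 0 else 1 + hyIdx (if c = '-' then k - 1 else k) r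

-- positions of all hyphens
def hyphPos : List Char → List Nat
  | [] => []
  | c :: r => if c = '-' then 0 :: (hyphPos r).map (· + 1) else (hyphPos r).map (· + 1)

theorem enum_find_eq (cs : List Char) (s : Int) :
    ((((PySem.List.enumerate cs s).find? (fun p => p.2 ∈ ['(', '{', '|', '['])).map (·.1)).getD
      (s + cs.length)) = s + (bracketIdx cs : Int) := by
  induction cs generalizing s with
  | nil => simp [PySem.List.enumerate_nil, bracketIdx]
  | cons c r ih =>
    rw [PySem.List.enumerate_cons, List.find?_cons]
    by_cases h : c = '(' ∨ c = '{' ∨ c = '|' ∨ c = '['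
    · simp [bracketIdx, h]
    · have hd : (decide (c ∈ ['(', '{', '|', '['])) = false := by
        simp only [List.mem_cons, List.not_mem_nil, or_false] at *
        simpa using h
      simp only [hd]
      have := ih (s + 1)
      simp only [List.length_cons, bracketIdx, h, if_false] at *
      push_cast at *
      rw [show s + ((r.length : Int) + 1) = s + 1 + r.length by ring, this]
      ring

theorem enum_filter_eq (cs : List Char) (s : Int) :
    (((PySem.List.enumerate cs s).filter (fun p => p.2 = '-')).map (·.1)) =
      (hyphPos cs).map (fun (k : Nat) => s + (k : Int)) := by
  induction cs generalizing s with
  | nil => simp [PySem.List.enumerate_nil, hyphPos]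
  | cons c r ih =>
    rw [PySem.List.enumerate_cons, List.filter_cons]
    by_cases h : c = '-'
    · rw [if_pos (by simp [h]), List.map_cons]
      rw [ih (s + 1)]
      rw [show hyphPos (c :: r) = 0 :: (hyphPos r).map (· + 1) from by simp [hyphPos, h]]
      rw [List.map_cons, List.map_map]
      refine congrArg₂ _ (by push_cast; ring) ?_
      apply List.map_congr_left
      intro k _
      simp only [Function.comp_apply]
      push_cast; ring
    · rw [if_neg (by simp [h])]
      rw [ih (s + 1)]
      rw [show hyphPos (c :: r) = (hyphPos r).map (· + 1) from by simp [hyphPos, h]]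
      rw [List.map_map]
      apply List.map_congr_left
      intro k _
      simp only [Function.comp_apply]
      push_cast; ring

theorem hyphPos_get (cs : List Char) (k : Nat) (hk : 1 ≤ k) :
    ((hyphPos cs)[k - 1]?).getD cs.length = hyIdx k cs := by
  induction cs generalizing k with
  | nil => simp [hyphPos, hyIdx]
  | cons c r ih =>
    by_cases h : c = '-'
    · by_cases h1 : k = 1
      · simp [hyphPos, hyIdx, h, h1]
      · rw [show hyphPos (c :: r) = 0 :: (hyphPos r).map (· + 1) from by simp [hyphPos, h]]
        rw [show hyIdx k (c :: r) = 1 + hyIdx (k - 1) r from by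
          simp [hyIdx, h, h1]]
        rw [show k - 1 = (k - 2) + 1 from by omega]
        rw [List.getElem?_cons_succ, List.getElem?_map]
        have := ih (k - 1) (by omega)
        rw [show k - 1 - 1 = k - 2 from by omega] at this
        rw [show k - 1 = k - 2 + 1 from by omega] at this
        cases hx : (hyphPos r)[k - 2]? with
        | none => simp [hx] at this ⊢; omega
        | some v => simp [hx] at this ⊢; omega
    · rw [show hyphPos (c :: r) = (hyphPos r).map (· + 1) from by simp [hyphPos, h]]
      rw [show hyIdx k (c :: r) = 1 + hyIdx k r from by simp [hyIdx, h]]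
      rw [List.getElem?_map]
      have := ih k hk
      cases hx : (hyphPos r)[k - 1]? with
      | none => simp [hx] at this ⊢; omega
      | some v => simp [hx] at this ⊢; omega

theorem loop_eq_take (cs : List Char) (k : Nat) (h1 : 1 ≤ k) (h2 : k ≤ 2) :
    junkRmvLoop cs (2 - (k : Int)) = cs.take (min (bracketIdx cs) (hyIdx k cs)) := by
  induction cs generalizing k with
  | nil => simp [junkRmvLoop]
  | cons c r ih =>
    by_cases hb : c = '(' ∨ c = '{' ∨ c = '|' ∨ c = '['
    · simp [junkRmvLoop, hb, bracketIdx]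
    · by_cases hh : c = '-'
      · by_cases hk1 : k = 1
        · subst hk1
          rw [show junkRmvLoop (c :: r) (2 - ((1 : Nat) : Int)) = [] from by
            simp [junkRmvLoop, hh]]
          rw [show hyIdx 1 (c :: r) = 0 from by simp [hyIdx, hh]]
          simp
        · have hk2 : k = 2 := by omega
          subst hk2
          rw [show junkRmvLoop (c :: r) (2 - ((2 : Nat) : Int)) = c :: junkRmvLoop r 1 from by
            simp [junkRmvLoop, hb, hh]]
          have := ih 1 (by omega) (by omega)
          norm_num at this
          rw [this]
          rw [show bracketIdx (c :: r) = 1 + bracketIdx r from by simp [bracketIdx, hb]]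
          rw [show hyIdx 2 (c :: r) = 1 + hyIdx 1 r from by simp [hyIdx, hh]]
          rw [Nat.add_min_add_left, Nat.add_comm 1 _, List.take_succ_cons]
      · rw [show junkRmvLoop (c :: r) (2 - (k : Int)) = c :: junkRmvLoop r (2 - (k : Int)) from by
          simp [junkRmvLoop, hb, hh]]
        rw [ih k h1 h2]
        rw [show bracketIdx (c :: r) = 1 + bracketIdx r from by simp [bracketIdx, hb]]
        rw [show hyIdx k (c :: r) = 1 + hyIdx k r from by simp [hyIdx, hh]]
        rw [Nat.add_min_add_left, Nat.add_comm 1 _, List.take_succ_cons]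

-- ===== VERDICT (by name: the statement is the Claim_ definition above) =====
theorem junkRmv_spec : Claim_equal_junkRmv := by
  intro inputName _
  unfold Spec_junkRmv junkRmv junkRmv_alt
  simp only
  set cs := inputName.toList with hcs
  have hb : (((PySem.List.enumerate cs 0).find? (fun p => p.2 ∈ ['(', '{', '|', '['])).map
      (·.1)).getD ((cs.length : Int)) = (bracketIdx cs : Int) := by
    have h0 := enum_find_eq cs 0
    rw [zero_add, zero_add] at h0
    exact h0
  have hsec : (if 2 ≤ (((PySem.List.enumerate cs 0).filter (fun p => p.2 = '-')).map (·.1)).length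
      then (((PySem.List.enumerate cs 0).filter (fun p => p.2 = '-')).map (·.1))[1]!
      else ((cs.length : Int))) = (hyIdx 2 cs : Int) := by
    rw [enum_filter_eq cs 0]
    have hg := hyphPos_get cs 2 (by omega)
    rw [List.length_map]
    by_cases h2 : 2 ≤ (hyphPos cs).length
    · rw [if_pos h2]
      have h1 : 1 < ((hyphPos cs).map (fun (k : Nat) => (0 : Int) + (k : Int))).length := by
        rw [List.length_map]; omega
      rw [List.getElem!_eq_getElem?_getD, List.getElem?_map]
      rw [List.getElem?_eq_getElem (by omega : 1 < (hyphPos cs).length)]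
      rw [List.getElem?_eq_getElem (by omega : 1 < (hyphPos cs).length)] at hg
      simp only [Option.map_some, Option.getD_some] at hg ⊢
      rw [← hg]
      ring
    · rw [if_neg h2]
      rw [List.getElem?_eq_none (by omega : (hyphPos cs).length ≤ 1)] at hg
      simp only [Option.getD_none] at hg
      rw [hg]
  rw [hb, hsec, ← Nat.cast_min, PySem.List.slice_to_natCast]
  rw [show (0 : Int) = 2 - ((2 : Nat) : Int) from by norm_num]
  rw [loop_eq_take cs 2 (by omega) (by omega)]
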